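-- pv_equiv track=rewrite | github.com/AugustBugge/canonicalSystems | canonical_rule2_percentages.py | is_canonical
-- ===== SOURCE A (Python) =====
-- from typing import List, Optional
--
-- INF = 10**9
--
-- def greedy_num_coins(amount: int, coins_desc: List[int]) -> Optional[int]:
--     """Greedy: take as many as possible of the largest coin, then next, etc."""
--     remaining = amount
--     count = 0
--     for c in coins_desc:
--         if remaining <= 0:
--             break
--         k = remaining // c
--         if k:
--             count += k
--             remaining -= k * c
--     return count if remaining == 0 else None
--
-- def dp_min_coins_up_to(max_amount: int, coins_asc: List[int]) -> List[int]:
--     """Unbounded coin-change DP for minimum coins up to max_amount."""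
--     dp = [INF] * (max_amount + 1)
--     dp[0] = 0
--     for x in range(1, max_amount + 1):
--         best = dp[x]
--         for c in coins_asc:
--             if c <= x:
--                 cand = dp[x - c] + 1
--                 if cand < best:
--                     best = cand
--         dp[x] = best
--     return dp
--
-- def is_canonical(coins_sorted: List[int], max_amount: int, require_reachable: bool) -> bool:
--     """Canonical ⇔ greedy matches optimal on all reachable amounts in 1..max_amount."""
--     dp_full = dp_min_coins_up_to(max_amount, coins_sorted)
--     coins_desc = list(reversed(coins_sorted))
--
--     reachable = 0
--     for a in range(1, max_amount + 1):
--         if dp_full[a] >= INF: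
--             continue
--         reachable += 1
--         g = greedy_num_coins(a, coins_desc)
--         if g != dp_full[a]:
--             return False
--     if require_reachable and reachable == 0:
--         return False
--     return True
-- ===== SOURCE B (Python) =====
-- from typing import List, Optional
--
-- INF = 10**9
--
-- def _greedy(rem: int, coins_desc: List[int]) -> Optional[int]:
--     """Greedy coin count, recursively over the coin list (largest first)."""
--     if rem == 0:
--         return 0
--     if not coins_desc:
--         return None
--     c = coins_desc[0]
--     k = rem // c
--     sub = _greedy(rem - k * c, coins_desc[1:])
--     return None if sub is None else sub + k
--
-- def is_canonical(coins_sorted: List[int], max_amount: int, require_reachable: bool) -> bool: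
--     """Single forward sweep: grow the dp list one amount at a time and check the
--     greedy answer immediately, returning False at the first mismatch."""
--     coins_desc = coins_sorted[::-1]
--     dp = [0]
--     reachable = 0
--     for x in range(1, max_amount + 1):
--         best = INF
--         for c in coins_sorted:
--             if 1 <= c <= x and dp[x - c] + 1 < best:
--                 best = dp[x - c] + 1
--         dp.append(best)
--         if best < INF:
--             reachable += 1
--             if _greedy(x, coins_desc) != best:
--                 return False
--     return not (require_reachable and reachable == 0)
-- ===== Notes on version B (the rewrite author's own statement) =====
-- stated objective: alternative
-- what changed: B replaces A's three separate passes (full preallocated dp table, then a second scan calling an iterative greedy) by one forward sweep that grows the dp list one amount at a time, checks a recursively-written greedy against each reachable amount immediately, and returns False at the first mismatch.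
-- outside the precondition, e.g. on is_canonical([0], 2, False): A returns True, B returns True; on is_canonical([0], 3, True): A returns False, B returns False
import Mathlib
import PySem

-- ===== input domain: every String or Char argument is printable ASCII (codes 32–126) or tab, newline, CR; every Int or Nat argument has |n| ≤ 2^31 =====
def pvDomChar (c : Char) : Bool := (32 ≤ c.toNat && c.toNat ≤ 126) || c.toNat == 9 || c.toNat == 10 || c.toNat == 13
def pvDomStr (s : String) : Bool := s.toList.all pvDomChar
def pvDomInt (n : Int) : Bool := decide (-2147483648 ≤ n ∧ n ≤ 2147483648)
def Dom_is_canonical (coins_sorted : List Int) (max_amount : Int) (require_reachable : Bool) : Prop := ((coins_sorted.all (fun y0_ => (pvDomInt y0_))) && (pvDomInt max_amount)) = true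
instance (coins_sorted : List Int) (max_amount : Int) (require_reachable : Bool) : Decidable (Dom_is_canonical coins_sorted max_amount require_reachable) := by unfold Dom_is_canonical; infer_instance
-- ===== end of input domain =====

-- B fuses A's dp-table pass and greedy-check pass into one early-exit sweep over a growing dp list,
-- with the greedy rewritten as a recursion over the coin list; equivalence proved under Pre_ (0 ≤ max_amount, all coins ≥ 1).


def pvINF : Int := 10 ^ 9

-- ===== PORT A =====
-- the 'for c in coins_desc' loop of greedy_num_coins, state (remaining, count); 'break' = stop recursing
def greedyLoopA : List Int → Int → Int → Int × Int
  | [], rem, cnt => (rem, cnt)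
  | c :: cs, rem, cnt =>
    if rem ≤ 0 then (rem, cnt)
    else
      let k := PySem.Int.floordiv rem c
      if k ≠ 0 then greedyLoopA cs (rem - k * c) (cnt + k)
      else greedyLoopA cs rem cnt

def greedy_num_coins (amount : Int) (coins_desc : List Int) : Option Int :=
  let p := greedyLoopA coins_desc amount 0
  if p.1 = 0 then some p.2 else none

def dp_min_coins_up_to (max_amount : Int) (coins_asc : List Int) : List Int :=
  let dp0 := PySem.List.pySetD (List.replicate (max_amount + 1).toNat pvINF) 0 0
  (PySem.List.pyRange 1 (max_amount + 1) 1).foldl (fun dp x =>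
    let best := coins_asc.foldl (fun best c =>
      if c ≤ x then
        let cand := PySem.List.pyGetD dp (x - c) pvINF + 1
        if cand < best then cand else best
      else best) (PySem.List.pyGetD dp x pvINF)
    PySem.List.pySetD dp x best) dp0

-- the 'for a in range(1, max_amount+1)' loop of is_canonical; none = the early 'return False'
def scanA (dp_full coins_desc : List Int) : List Int → Int → Option Int
  | [], reach => some reach
  | a :: as, reach =>
    if pvINF ≤ PySem.List.pyGetD dp_full a pvINF then scanA dp_full coins_desc as reach
    else
      if greedy_num_coins a coins_desc ≠ some (PySem.List.pyGetD dp_full a pvINF) then none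
      else scanA dp_full coins_desc as (reach + 1)

def is_canonical (coins_sorted : List Int) (max_amount : Int) (require_reachable : Bool) : Bool :=
  let dp_full := dp_min_coins_up_to max_amount coins_sorted
  let coins_desc := coins_sorted.reverse
  match scanA dp_full coins_desc (PySem.List.pyRange 1 (max_amount + 1) 1) 0 with
  | none => false
  | some reachable => if require_reachable && reachable == 0 then false else true

-- ===== PORT B =====
def greedyB : Int → List Int → Option Int
  | rem, [] => if rem = 0 then some 0 else none
  | rem, c :: cs =>
    if rem = 0 then some 0
    else
      let k := PySem.Int.floordiv rem c
      (greedyB (rem - k * c) cs).map (· + k)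

-- the fused sweep: dp grows by one entry per amount; none = the early 'return False'
def loopB (coins coins_desc : List Int) : List Int → List Int → Int → Option Int
  | _, [], reach => some reach
  | dp, x :: xs, reach =>
    let best := coins.foldl (fun best c =>
      if 1 ≤ c ∧ c ≤ x ∧ PySem.List.pyGetD dp (x - c) pvINF + 1 < best
      then PySem.List.pyGetD dp (x - c) pvINF + 1 else best) pvINF
    let dp' := dp ++ [best]
    if best < pvINF then
      if greedyB x coins_desc ≠ some best then none
      else loopB coins coins_desc dp' xs (reach + 1)
    else loopB coins coins_desc dp' xs reach

def is_canonical_alt (coins_sorted : List Int) (max_amount : Int) (require_reachable : Bool) : Bool :=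
  let coins_desc := coins_sorted.reverse  -- coins_sorted[::-1]
  match loopB coins_sorted coins_desc [0] (PySem.List.pyRange 1 (max_amount + 1) 1) 0 with
  | none => false
  | some reachable => !(require_reachable && reachable == 0)

-- ===== PRECONDITION & SPEC =====
-- Pre_ excludes negative max_amount (A's dp[0] = 0 raises IndexError) and, when any amount is to be checked,
-- nonpositive coins (A's greedy raises ZeroDivisionError on 0 and its dp raises IndexError on negatives whenever
-- the loops reach them; where such a coin happens to stay inert, A's value is an accident of never reaching it).
def Pre_is_canonical (coins_sorted : List Int) (max_amount : Int) (require_reachable : Bool) : Prop :=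
  0 ≤ max_amount ∧ (max_amount = 0 ∨ ∀ c ∈ coins_sorted, 1 ≤ c)
instance (coins_sorted : List Int) (max_amount : Int) (require_reachable : Bool) : Decidable (Pre_is_canonical coins_sorted max_amount require_reachable) := by unfold Pre_is_canonical; infer_instance

def pvWitness_is_canonical : List Int × Int × Bool := ([1, 3, 4], 6, true)

def Spec_is_canonical (coins_sorted : List Int) (max_amount : Int) (require_reachable : Bool) (out : Bool) : Prop := out = is_canonical_alt coins_sorted max_amount require_reachable
instance (coins_sorted : List Int) (max_amount : Int) (require_reachable : Bool) (out : Bool) : Decidable (Spec_is_canonical coins_sorted max_amount require_reachable out) := by unfold Spec_is_canonical; infer_instance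

-- ===== CLAIM (what is proved, stated in full; the proofs are below) =====
def Claim_equal_is_canonical : Prop := ∀ (coins_sorted : List Int) (max_amount : Int) (require_reachable : Bool), Dom_is_canonical coins_sorted max_amount require_reachable → Pre_is_canonical coins_sorted max_amount require_reachable → Spec_is_canonical coins_sorted max_amount require_reachable (is_canonical coins_sorted max_amount require_reachable)

-- ===== LEMMAS AND PROOFS =====

-- reference table: exactly the dp list B has built after amounts 1..n
def bestOf (coins dp : List Int) (x : Int) : Int :=
  coins.foldl (fun best c =>
    if 1 ≤ c ∧ c ≤ x ∧ PySem.List.pyGetD dp (x - c) pvINF + 1 < best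
    then PySem.List.pyGetD dp (x - c) pvINF + 1 else best) pvINF

def dpTab (coins : List Int) : Nat → List Int
  | 0 => [0]
  | n + 1 => dpTab coins n ++ [bestOf coins (dpTab coins n) ((n : Int) + 1)]

theorem length_dpTab (coins : List Int) (n : Nat) : (dpTab coins n).length = n + 1 := by
  induction n with
  | zero => rfl
  | succ n ih => simp [dpTab, ih]

theorem dpTab_prefix (coins : List Int) {k m : Nat} (h : k ≤ m) :
    dpTab coins k <+: dpTab coins m := by
  induction m with
  | zero => simpa [Nat.le_zero.mp h]
  | succ m ih =>
    rcases Nat.lt_or_ge k (m + 1) with h' | h'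
    · exact (ih (Nat.lt_succ_iff.mp h')).trans ⟨_, rfl⟩
    · have : k = m + 1 := le_antisymm h h'
      simp [this]

theorem greedy_eq (cs : List Int) (hcs : ∀ c ∈ cs, 1 ≤ c) :
    ∀ (rem cnt : Int), 0 ≤ rem →
      (if (greedyLoopA cs rem cnt).1 = 0 then some (greedyLoopA cs rem cnt).2 else none)
        = (greedyB rem cs).map (· + cnt) := by
  induction cs with
  | nil =>
    intro rem cnt _
    by_cases h : rem = 0 <;> simp [greedyLoopA, greedyB, h]
  | cons c cs ih =>
    intro rem cnt hrem
    have hc1 : 1 ≤ c := hcs c (by simp)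
    have hcs' : ∀ c ∈ cs, 1 ≤ c := fun d hd => hcs d (by simp [hd])
    by_cases h0 : rem = 0
    · simp [greedyLoopA, greedyB, h0]
    · have hpos : 0 < rem := lt_of_le_of_ne hrem (Ne.symm h0)
      simp only [greedyLoopA, greedyB, if_neg (by omega : ¬ rem ≤ 0), if_neg h0]
      set k := PySem.Int.floordiv rem c with hkdef
      have hrem' : 0 ≤ rem - k * c := by
        have h1 := PySem.Int.floordiv_mul_add_mod rem c
        rw [← hkdef] at h1
        have h2 := PySem.Int.mod_nonneg rem (show (0:Int) < c by omega)
        omega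
      by_cases hk : k = 0
      · simp only [hk, ne_eq, not_true_eq_false, if_false, zero_mul, sub_zero]
        rw [ih hcs' rem cnt hrem]
        cases greedyB rem cs <;> simp
      · simp only [ne_eq, hk, not_false_eq_true, if_true]
        rw [ih hcs' (rem - k * c) (cnt + k) hrem']
        cases greedyB (rem - k * c) cs <;> simp <;> ring

theorem pyGetD_append_lt (xs ys : List Int) (i : Int) (d : Int) (h0 : 0 ≤ i) (h : i < xs.length) :
    PySem.List.pyGetD (xs ++ ys) i d = PySem.List.pyGetD xs i d := by
  rw [PySem.List.pyGetD_eq_getElem _ _ h0 (by simp; omega),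
      PySem.List.pyGetD_eq_getElem _ _ h0 (by simpa using h)]
  exact List.getElem_append_left (by omega)

theorem pyGetD_append_len (xs : List Int) (y : Int) (ys : List Int) (d : Int) :
    PySem.List.pyGetD (xs ++ y :: ys) (xs.length : Int) d = y := by
  rw [PySem.List.pyGetD_eq_getElem _ _ (by positivity) (by simp)]
  simp

theorem dpA_fold (coins : List Int) (M : Int) (hM : 0 ≤ M) (hc : ∀ c ∈ coins, 1 ≤ c) :
    ∀ (k : Nat), (k : Int) ≤ M →
      (PySem.List.pyRange 1 ((k : Int) + 1) 1).foldl (fun dp x =>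
        let best := coins.foldl (fun best c =>
          if c ≤ x then
            let cand := PySem.List.pyGetD dp (x - c) pvINF + 1
            if cand < best then cand else best
          else best) (PySem.List.pyGetD dp x pvINF)
        PySem.List.pySetD dp x best)
        (PySem.List.pySetD (List.replicate (M + 1).toNat pvINF) 0 0)
      = dpTab coins k ++ List.replicate ((M + 1).toNat - (k + 1)) pvINF := by
  intro k
  induction k with
  | zero =>
    intro _
    rw [PySem.List.pyRange_one_eq_nil (by omega)]
    have : (M + 1).toNat = M.toNat + 1 := by omega
    rw [List.foldl_nil, this, List.replicate_succ, PySem.List.pySetD_of_nonneg _ _ le_rfl]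
    simp [dpTab]
  | succ k ih =>
    intro hk1
    have hk : (k : Int) ≤ M := by push_cast at hk1 ⊢; omega
    rw [show ((k + 1 : Nat) : Int) + 1 = ((k : Int) + 1) + 1 by push_cast; ring,
        PySem.List.pyRange_one_succ_right (by omega), List.foldl_append, ih hk]
    set dpk := dpTab coins k with hdpk
    set r := (M + 1).toNat - (k + 1) with hr
    have hrpos : 1 ≤ r := by omega
    have hlen : dpk.length = k + 1 := length_dpTab coins k
    simp only [List.foldl_cons, List.foldl_nil]
    -- the initial 'best' = dp[x] = INF
    have hinit : PySem.List.pyGetD (dpk ++ List.replicate r pvINF) ((k : Int) + 1) pvINF = pvINF := by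
      obtain ⟨r', hr'⟩ : ∃ r', r = r' + 1 := ⟨r - 1, by omega⟩
      rw [hr', List.replicate_succ, show ((k:Int)+1) = (dpk.length : Int) by rw [hlen]; push_cast; ring]
      exact pyGetD_append_len _ _ _ _
    -- the inner fold computes bestOf over the prefix
    have hfold : coins.foldl (fun best c =>
          if c ≤ (k:Int)+1 then
            let cand := PySem.List.pyGetD (dpk ++ List.replicate r pvINF) (((k:Int)+1) - c) pvINF + 1
            if cand < best then cand else best
          else best) (PySem.List.pyGetD (dpk ++ List.replicate r pvINF) ((k:Int)+1) pvINF)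
        = bestOf coins dpk ((k : Int) + 1) := by
      rw [hinit]
      unfold bestOf
      refine PySem.List.foldl_congr_mem _ _ _ _ (fun best c hcmem => ?_)
      have hc1 : 1 ≤ c := hc c hcmem
      by_cases hcx : c ≤ (k:Int)+1
      · have : PySem.List.pyGetD (dpk ++ List.replicate r pvINF) (((k:Int)+1) - c) pvINF
            = PySem.List.pyGetD dpk (((k:Int)+1) - c) pvINF := by
          refine pyGetD_append_lt _ _ _ _ (by omega) (by rw [hlen]; push_cast; omega)
        simp [this, hcx, hc1]
      · simp [hcx]
    rw [hfold]
    -- the set appends the new value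
    obtain ⟨r', hr'⟩ : ∃ r', r = r' + 1 := ⟨r - 1, by omega⟩
    rw [PySem.List.pySetD_of_nonneg _ _ (by omega : (0:Int) ≤ (k:Int)+1)]
    have htn : ((k:Int)+1).toNat = dpk.length := by omega
    rw [htn, hr', List.replicate_succ, List.set_append_right _ _ (le_refl _),
        Nat.sub_self, List.set_cons_zero]
    have : (M + 1).toNat - (k + 1 + 1) = r' := by omega
    rw [this]
    simp [dpTab, ← hdpk]

theorem dpTab_getD (coins : List Int) (m k : Nat) (h : k + 1 ≤ m) :
    PySem.List.pyGetD (dpTab coins m) ((k : Int) + 1) pvINF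
      = bestOf coins (dpTab coins k) ((k : Int) + 1) := by
  obtain ⟨t, ht⟩ := dpTab_prefix coins h
  rw [← ht, show dpTab coins (k+1) = dpTab coins k ++ [bestOf coins (dpTab coins k) ((k:Int)+1)] from rfl]
  rw [List.append_assoc, List.cons_append,
      show ((k : Int) + 1) = ((dpTab coins k).length : Int) by rw [length_dpTab]; push_cast; ring]
  exact pyGetD_append_len _ _ _ _

theorem scan_loop_eq (coins : List Int) (M : Int) (hM : 0 ≤ M) (hc : ∀ c ∈ coins, 1 ≤ c) :
    ∀ (n k : Nat) (reach : Int), M.toNat - k = n → (k : Int) ≤ M →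
      scanA (dpTab coins M.toNat) coins.reverse (PySem.List.pyRange ((k : Int) + 1) (M + 1) 1) reach
        = loopB coins coins.reverse (dpTab coins k) (PySem.List.pyRange ((k : Int) + 1) (M + 1) 1) reach := by
  intro n
  induction n with
  | zero =>
    intro k reach hn hk
    rw [PySem.List.pyRange_one_eq_nil (by omega)]
    rfl
  | succ n ih =>
    intro k reach hn hk
    have hklt : (k : Int) < M := by omega
    rw [PySem.List.pyRange_one_cons (by omega)]
    have hbest : PySem.List.pyGetD (dpTab coins M.toNat) ((k : Int) + 1) pvINF
        = bestOf coins (dpTab coins k) ((k : Int) + 1) :=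
      dpTab_getD coins M.toNat k (by omega)
    set best := bestOf coins (dpTab coins k) ((k : Int) + 1) with hbdef
    have hstep : dpTab coins k ++ [best] = dpTab coins (k + 1) := rfl
    have hrec : ((k : Int) + 1) + 1 = ((k + 1 : Nat) : Int) + 1 := by push_cast; ring
    have hg : greedy_num_coins ((k : Int) + 1) coins.reverse = greedyB ((k : Int) + 1) coins.reverse := by
      have := greedy_eq coins.reverse (fun c hc' => hc c (List.mem_reverse.mp hc')) ((k:Int)+1) 0 (by omega)
      unfold greedy_num_coins
      rw [this]
      cases greedyB ((k:Int)+1) coins.reverse <;> simp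
    rw [scanA, loopB]
    have hfoldeq : (List.foldl (fun best c =>
        if 1 ≤ c ∧ c ≤ (k:Int)+1 ∧ PySem.List.pyGetD (dpTab coins k) ((k:Int)+1 - c) pvINF + 1 < best
        then PySem.List.pyGetD (dpTab coins k) ((k:Int)+1 - c) pvINF + 1 else best) pvINF coins) = best := rfl
    simp only [hbest, hfoldeq, hg]
    by_cases hlt : best < pvINF
    · rw [if_neg (by omega : ¬ pvINF ≤ best), if_pos hlt]
      by_cases hne : greedyB ((k:Int)+1) coins.reverse = some best
      · rw [if_neg (by simp [hne]), if_neg (by simp [hne]), hstep, hrec]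
        exact ih (k+1) (reach+1) (by omega) (by push_cast; omega)
      · rw [if_pos (by simp [hne]), if_pos (by simp [hne])]
    · rw [if_pos (by omega : pvINF ≤ best), if_neg hlt, hstep, hrec]
      exact ih (k+1) reach (by omega) (by push_cast; omega)

-- ===== VERDICT (by name: the statement is the Claim_ definition above) =====
theorem is_canonical_spec : Claim_equal_is_canonical := by
  intro coins M req _ hpre
  obtain ⟨hM, hco⟩ := hpre
  rcases hco with h0 | hc
  · subst h0
    unfold Spec_is_canonical is_canonical is_canonical_alt
    rw [PySem.List.pyRange_one_eq_nil (by omega)]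
    cases req <;> rfl
  unfold Spec_is_canonical is_canonical is_canonical_alt
  have hdp : dp_min_coins_up_to M coins = dpTab coins M.toNat := by
    have h := dpA_fold coins M hM hc M.toNat (by omega)
    unfold dp_min_coins_up_to
    rw [show ((M.toNat : Int) + 1) = M + 1 by omega] at h
    rw [h]
    simp [show (M + 1).toNat - (M.toNat + 1) = 0 by omega]
  have hsc := scan_loop_eq coins M hM hc M.toNat 0 0 (by omega) (by omega)
  simp only [Nat.cast_zero, zero_add] at hsc
  rw [show dpTab coins 0 = [0] from rfl] at hsc
  simp only [hdp, hsc]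
  cases hcase : loopB coins coins.reverse [0] (PySem.List.pyRange 1 (M + 1) 1) 0 with
  | none => rfl
  | some r => cases hb : (req && r == 0) <;> simp [hb]
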